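-- pv_equiv track=rewrite | github.com/angelaJU/execution-bots | VolumeBot.py | overlay_hidden_orders
-- ===== SOURCE A (Python) =====
-- def overlay_hidden_orders(bid_1, ask_1, hidden_orders):
--     """ countdown hidden orders, overlay them and return the expected bid_1, ask_1 """
--     result = {"bid_1": bid_1, "ask_1": ask_1}
--     for side, operation, reference in [("bids", max, "bid_1"), ("asks", min, "ask_1")]:
--         cur_hidden_orders = hidden_orders.get(side, [])
--         new_hidden_orders = []
--         while len(cur_hidden_orders) > 0:
--             hidden_order = cur_hidden_orders.pop()
--             # remove hidden orders that have "expired", also orders whose prices no longer make sense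
--             if hidden_order["countdown"] != 0 and ((side == "bids" and hidden_order["price"] < ask_1) or (side == "asks" and hidden_order["price"] > bid_1)):
--                 hidden_order["countdown"] = hidden_order.get("countdown", 0) - 1
--                 new_hidden_orders.append(hidden_order)
--                 result[reference] = operation(result[reference], hidden_order.get("price", 0))
--         hidden_orders.update({side: new_hidden_orders})
--     return {"price": result["bid_1"]}, {"price": result["ask_1"]}, hidden_orders
-- ===== SOURCE B (Python) =====
-- def _sweep(orders, keep):
--     """Walk the side's orders newest-popped-first (reversed), decrement survivors in place."""
--     kept = []
--     for ho in reversed(orders):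
--         if ho["countdown"] != 0 and keep(ho["price"]):
--             ho["countdown"] -= 1
--             kept.append(ho)
--     return kept
--
--
-- def overlay_hidden_orders(bid_1, ask_1, hidden_orders):
--     """ countdown hidden orders, overlay them and return the expected bid_1, ask_1 """
--     bids = _sweep(hidden_orders.get("bids", []), lambda p: p < ask_1)
--     hidden_orders["bids"] = bids
--     asks = _sweep(hidden_orders.get("asks", []), lambda p: p > bid_1)
--     hidden_orders["asks"] = asks
--     best_bid = max([bid_1] + [ho.get("price", 0) for ho in bids])
--     best_ask = min([ask_1] + [ho.get("price", 0) for ho in asks])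
--     return {"price": best_bid}, {"price": best_ask}, hidden_orders
-- ===== Notes on version B (the rewrite author's own statement) =====
-- stated objective: simpler
-- what changed: Replaces the (side, operation, reference) table, the mutable result dict and the destructive while/pop loop with a running max/min by a per-side helper that filters-and-decrements the reversed order list, then overlays the best bid/ask with one batch max/min over the collected prices; same in-place mutation of hidden_orders. Pre_ excludes inputs where both programs raise KeyError (an order missing 'countdown', or missing 'price' with nonzero countdown) and association lists with duplicate keys, which no Python dict can represent.
import Mathlib
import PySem

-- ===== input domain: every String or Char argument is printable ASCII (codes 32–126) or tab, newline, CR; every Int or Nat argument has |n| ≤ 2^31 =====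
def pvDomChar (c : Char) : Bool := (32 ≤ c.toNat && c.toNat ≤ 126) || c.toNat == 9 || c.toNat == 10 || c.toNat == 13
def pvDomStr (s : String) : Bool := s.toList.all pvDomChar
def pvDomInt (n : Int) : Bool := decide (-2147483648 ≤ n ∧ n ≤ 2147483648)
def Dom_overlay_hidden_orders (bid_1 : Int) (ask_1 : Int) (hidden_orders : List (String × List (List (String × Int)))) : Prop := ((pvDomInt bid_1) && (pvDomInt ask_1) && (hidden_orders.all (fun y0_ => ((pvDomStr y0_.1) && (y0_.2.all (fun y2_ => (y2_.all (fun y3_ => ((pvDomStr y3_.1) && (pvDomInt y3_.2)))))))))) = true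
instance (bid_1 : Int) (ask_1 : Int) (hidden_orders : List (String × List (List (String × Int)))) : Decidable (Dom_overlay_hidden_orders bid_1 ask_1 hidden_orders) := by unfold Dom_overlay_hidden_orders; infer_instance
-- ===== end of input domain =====

-- B replaces A's (side, op, reference) table, mutable result dict and while/pop running-extremum loop by a
-- per-side filter-and-decrement sweep plus one batch max/min over the kept prices (objective: simpler).
-- Both Pythons mutate hidden_orders (and the kept order dicts) in place identically; the equivalence
-- proved here is about the returned triple, whose third component IS the mutated hidden_orders.

-- ===== PORT A =====
-- the 'while len(cur) > 0: ho = cur.pop()' loop: popping from the end = structural recursion on cur.reverse;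
-- state is (new_hidden_orders, result); direct ho["countdown"] / ho["price"] accesses are total getD here,
-- exact under Pre_ (which keeps the keys present exactly where Python reads them)
def pvAWhile (side : String) (operation : Int → Int → Int) (reference : String)
    (bid_1 ask_1 : Int) :
    List (List (String × Int)) → List (List (String × Int)) → PySem.Dict String Int →
    (List (List (String × Int)) × PySem.Dict String Int)
  | [], newOrders, result => (newOrders, result)
  | ho :: rest, newOrders, result =>
    let hoD := PySem.Dict.mk ho
    if PySem.Dict.getD hoD "countdown" 0 ≠ 0 ∧
        ((side = "bids" ∧ PySem.Dict.getD hoD "price" 0 < ask_1) ∨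
         (side = "asks" ∧ PySem.Dict.getD hoD "price" 0 > bid_1)) then
      let ho' := PySem.Dict.insert hoD "countdown" (PySem.Dict.getD hoD "countdown" 0 - 1)
      pvAWhile side operation reference bid_1 ask_1 rest (newOrders ++ [ho'.items])
        (PySem.Dict.insert result reference
          (operation (PySem.Dict.getD result reference 0) (PySem.Dict.getD ho' "price" 0)))
    else
      pvAWhile side operation reference bid_1 ask_1 rest newOrders result

def overlay_hidden_orders (bid_1 : Int) (ask_1 : Int) (hidden_orders : List (String × List (List (String × Int)))) : (List (String × Int)) × (List (String × Int)) × (List (String × List (List (String × Int)))) :=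
  let result0 : PySem.Dict String Int := PySem.Dict.mk [("bid_1", bid_1), ("ask_1", ask_1)]
  let st := [("bids", (fun a b => max a b : Int → Int → Int), "bid_1"),
             ("asks", (fun a b => min a b : Int → Int → Int), "ask_1")].foldl
    (fun (st : PySem.Dict String Int × PySem.Dict String (List (List (String × Int)))) t =>
      let cur := PySem.Dict.getD st.2 t.1 []
      let res := pvAWhile t.1 t.2.1 t.2.2 bid_1 ask_1 cur.reverse [] st.1
      (res.2, PySem.Dict.insert st.2 t.1 res.1))
    (result0, PySem.Dict.mk hidden_orders)
  ([("price", PySem.Dict.getD st.1 "bid_1" 0)],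
   [("price", PySem.Dict.getD st.1 "ask_1" 0)],
   st.2.items)

-- ===== PORT B =====
-- Source B's _sweep: for-loop over reversed(orders) appending survivors = structural recursion on the reversed list
def pvSweep (keep : Int → Bool) : List (List (String × Int)) → List (List (String × Int))
  | [] => []
  | ho :: rest =>
    let hoD := PySem.Dict.mk ho
    if PySem.Dict.getD hoD "countdown" 0 ≠ 0 ∧ keep (PySem.Dict.getD hoD "price" 0) then
      (PySem.Dict.insert hoD "countdown" (PySem.Dict.getD hoD "countdown" 0 - 1)).items :: pvSweep keep rest
    else
      pvSweep keep rest

def overlay_hidden_orders_alt (bid_1 : Int) (ask_1 : Int) (hidden_orders : List (String × List (List (String × Int)))) : (List (String × Int)) × (List (String × Int)) × (List (String × List (List (String × Int)))) :=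
  let d := PySem.Dict.mk hidden_orders
  let bids := pvSweep (fun p => decide (p < ask_1)) (PySem.Dict.getD d "bids" []).reverse
  let d1 := PySem.Dict.insert d "bids" bids
  let asks := pvSweep (fun p => decide (p > bid_1)) (PySem.Dict.getD d1 "asks" []).reverse
  let d2 := PySem.Dict.insert d1 "asks" asks
  -- max([bid_1] + prices) / min([ask_1] + prices): Python's max/min of a nonempty int list is the left fold of binary max/min
  let best_bid := (bids.map (fun ho => PySem.Dict.getD (PySem.Dict.mk ho) "price" 0)).foldl max bid_1
  let best_ask := (asks.map (fun ho => PySem.Dict.getD (PySem.Dict.mk ho) "price" 0)).foldl min ask_1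
  ([("price", best_bid)], [("price", best_ask)], d2.items)

-- ===== PRECONDITION & SPEC =====
-- Pre_ excludes (a) inputs where BOTH programs raise KeyError: an order under "bids"/"asks" missing the
-- "countdown" key, or missing "price" while its countdown is nonzero; (b) association lists with duplicate
-- keys (in hidden_orders or inside an order), which no Python dict can represent.
def Pre_overlay_hidden_orders (bid_1 : Int) (ask_1 : Int) (hidden_orders : List (String × List (List (String × Int)))) : Prop :=
  (hidden_orders.map Prod.fst).Nodup ∧
  ∀ side ∈ ["bids", "asks"], ∀ ho ∈ PySem.Dict.getD (PySem.Dict.mk hidden_orders) side [],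
    (ho.map Prod.fst).Nodup ∧
    PySem.Dict.contains (PySem.Dict.mk ho) "countdown" = true ∧
    (PySem.Dict.getD (PySem.Dict.mk ho) "countdown" 0 ≠ 0 →
      PySem.Dict.contains (PySem.Dict.mk ho) "price" = true)
instance (bid_1 : Int) (ask_1 : Int) (hidden_orders : List (String × List (List (String × Int)))) : Decidable (Pre_overlay_hidden_orders bid_1 ask_1 hidden_orders) := by unfold Pre_overlay_hidden_orders; infer_instance

def pvWitness_overlay_hidden_orders : Int × Int × (List (String × List (List (String × Int)))) :=
  (5, 10, [("bids", [[("countdown", 2), ("price", 7)]]), ("asks", [[("countdown", 1), ("price", 9)]])])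

def Spec_overlay_hidden_orders (bid_1 : Int) (ask_1 : Int) (hidden_orders : List (String × List (List (String × Int)))) (out : (List (String × Int)) × (List (String × Int)) × (List (String × List (List (String × Int))))) : Prop := out = overlay_hidden_orders_alt bid_1 ask_1 hidden_orders
instance (bid_1 : Int) (ask_1 : Int) (hidden_orders : List (String × List (List (String × Int)))) (out : (List (String × Int)) × (List (String × Int)) × (List (String × List (List (String × Int))))) : Decidable (Spec_overlay_hidden_orders bid_1 ask_1 hidden_orders out) := by
  unfold Spec_overlay_hidden_orders
  -- assembled by hand: the instance term for the triple exceeds the default synthInstance.maxSize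
  have i1 : DecidableEq (List (String × Int)) := inferInstance
  have i2 : DecidableEq (List (String × List (List (String × Int)))) := inferInstance
  exact @instDecidableEqProd _ _ i1 (@instDecidableEqProd _ _ i1 i2) _ _

-- ===== CLAIM (what is proved, stated in full; the proofs are below) =====
def Claim_equal_overlay_hidden_orders : Prop := ∀ (bid_1 : Int) (ask_1 : Int) (hidden_orders : List (String × List (List (String × Int)))), Dom_overlay_hidden_orders bid_1 ask_1 hidden_orders → Pre_overlay_hidden_orders bid_1 ask_1 hidden_orders → Spec_overlay_hidden_orders bid_1 ask_1 hidden_orders (overlay_hidden_orders bid_1 ask_1 hidden_orders)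

-- ===== LEMMAS AND PROOFS =====

-- A's while/pop loop = (kept orders appended behind newOrders, running-extremum updates folded over them)
lemma pvAWhile_eq (side : String) (operation : Int → Int → Int) (reference : String)
    (bid_1 ask_1 : Int) (keep : Int → Bool)
    (hk : ∀ p : Int, ((side = "bids" ∧ p < ask_1) ∨ (side = "asks" ∧ p > bid_1)) ↔ keep p = true) :
    ∀ (l newOrders : List (List (String × Int))) (result : PySem.Dict String Int),
      pvAWhile side operation reference bid_1 ask_1 l newOrders result =
        (newOrders ++ pvSweep keep l,
         (pvSweep keep l).foldl
           (fun r ho => PySem.Dict.insert r reference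
             (operation (PySem.Dict.getD r reference 0)
               (PySem.Dict.getD (PySem.Dict.mk ho) "price" 0))) result) := by
  intro l
  induction l with
  | nil => intro newOrders result; simp [pvAWhile, pvSweep]
  | cons ho rest ih =>
    intro newOrders result
    by_cases h : PySem.Dict.getD (PySem.Dict.mk ho) "countdown" 0 ≠ 0 ∧
        ((side = "bids" ∧ PySem.Dict.getD (PySem.Dict.mk ho) "price" 0 < ask_1) ∨
         (side = "asks" ∧ PySem.Dict.getD (PySem.Dict.mk ho) "price" 0 > bid_1))
    · have hb : (PySem.Dict.getD (PySem.Dict.mk ho) "countdown" 0 ≠ 0 ∧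
          keep (PySem.Dict.getD (PySem.Dict.mk ho) "price" 0) = true) := ⟨h.1, (hk _).mp h.2⟩
      simp only [pvAWhile, pvSweep, if_pos h, if_pos hb, ih]
      simp
    · have hb : ¬ (PySem.Dict.getD (PySem.Dict.mk ho) "countdown" 0 ≠ 0 ∧
          keep (PySem.Dict.getD (PySem.Dict.mk ho) "price" 0) = true) := by
        intro hc; exact h ⟨hc.1, (hk _).mpr hc.2⟩
      simp only [pvAWhile, pvSweep, if_neg h, if_neg hb, ih]

-- reading the running-extremum fold at its own key collapses to a batch fold over the prices
lemma getD_fold_self (reference : String) (operation : Int → Int → Int) :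
    ∀ (ps : List (List (String × Int))) (r : PySem.Dict String Int),
      PySem.Dict.getD
        (ps.foldl (fun r ho => PySem.Dict.insert r reference
          (operation (PySem.Dict.getD r reference 0)
            (PySem.Dict.getD (PySem.Dict.mk ho) "price" 0))) r) reference 0 =
      (ps.map (fun ho => PySem.Dict.getD (PySem.Dict.mk ho) "price" 0)).foldl operation
        (PySem.Dict.getD r reference 0) := by
  intro ps
  induction ps with
  | nil => intro r; simp
  | cons ho rest ih =>
    intro r
    simp only [List.foldl_cons, List.map_cons, ih, PySem.Dict.getD_insert_self]

-- the fold at one key does not touch the other key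
lemma getD_fold_other (reference other : String) (hne : other ≠ reference)
    (operation : Int → Int → Int) :
    ∀ (ps : List (List (String × Int))) (r : PySem.Dict String Int),
      PySem.Dict.getD
        (ps.foldl (fun r ho => PySem.Dict.insert r reference
          (operation (PySem.Dict.getD r reference 0)
            (PySem.Dict.getD (PySem.Dict.mk ho) "price" 0))) r) other 0 =
      PySem.Dict.getD r other 0 := by
  intro ps
  induction ps with
  | nil => intro r; simp
  | cons ho rest ih =>
    intro r
    simp only [List.foldl_cons, ih, PySem.Dict.getD_insert_of_ne _ _ _ hne]

-- ===== VERDICT (by name: the statement is the Claim_ definition above) =====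
theorem overlay_hidden_orders_spec : Claim_equal_overlay_hidden_orders := by
  intro bid_1 ask_1 hidden_orders _ _
  unfold Spec_overlay_hidden_orders overlay_hidden_orders overlay_hidden_orders_alt
  simp only [List.foldl_cons, List.foldl_nil]
  rw [pvAWhile_eq "bids" (fun a b => max a b) "bid_1" bid_1 ask_1
        (fun p => decide (p < ask_1)) (by intro p; simp),
      pvAWhile_eq "asks" (fun a b => min a b) "ask_1" bid_1 ask_1
        (fun p => decide (p > bid_1)) (by intro p; simp)]
  simp only [List.nil_append]
  rw [getD_fold_other "ask_1" "bid_1" (by decide) min,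
      getD_fold_self "bid_1" max,
      getD_fold_self "ask_1" min,
      getD_fold_other "bid_1" "ask_1" (by decide) max]
  simp [PySem.Dict.getD, PySem.Dict.get?_mk_cons]
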